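-- pv_equiv track=rewrite | github.com/AP-MI-2021/lab-2-BivolaruCatalina | main.py | is_antipalindrome
-- ===== SOURCE A (Python) =====
-- def is_antipalindrome(n):
--     '''
--     Verifica daca n este antipalindrom
--     :param n: numar intreg
--     :return: valoare de adevar in functie de caz
--     '''
--     invers = 0
--     copie = n
--     aux = n
--     parametru1 = 0
--     parametru2=0
--     while aux != 0:
--         parametru1 = parametru1+1
--         aux = aux//10
--     if parametru1%2 == 0:
--         while parametru2 < parametru1//2:
--             invers = invers*10+copie%10
--             copie = copie//10
--             parametru2 = parametru2+1
--     else: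
--         while parametru2 < parametru1 // 2:
--             invers = invers * 10 + copie % 10
--             copie = copie // 10
--             parametru2 = parametru2 + 1
--         copie = copie//10
--     while invers != 0:
--         if invers%10 == copie% 10:
--             return False
--         invers = invers//10
--         copie = copie//10
--     return True
-- ===== SOURCE B (Python) =====
-- def is_antipalindrome(n):
--     # Extract all digits (least-significant first), then walk two indices
--     # inward: every mirror pair must differ.
--     digits = []
--     while n:
--         digits.append(n % 10)
--         n //= 10
--     left, right = 0, len(digits) - 1
--     while left < right:
--         if digits[left] == digits[right]:
--             return False
--         left += 1
--         right -= 1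
--     return True
-- ===== Notes on version B (the rewrite author's own statement) =====
-- stated objective: simpler
-- what changed: B replaces A's three arithmetic loops (count digits, build the reversed lower half as a number, compare it digit-by-digit against the upper half) with one digit-list extraction and a two-pointer scan over that list.
-- intended difference: On nonnegative n whose low digits are zero in a way that makes A's reversed lower half drop leading zeros while all the pairs A does compare differ (e.g. n=1000), A skips mirror pairs whose digits are both 0 and wrongly returns True; B compares every mirror pair and returns False, the intended answer. — e.g. on is_antipalindrome(1000): A returns true, B returns false
import Mathlib
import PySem

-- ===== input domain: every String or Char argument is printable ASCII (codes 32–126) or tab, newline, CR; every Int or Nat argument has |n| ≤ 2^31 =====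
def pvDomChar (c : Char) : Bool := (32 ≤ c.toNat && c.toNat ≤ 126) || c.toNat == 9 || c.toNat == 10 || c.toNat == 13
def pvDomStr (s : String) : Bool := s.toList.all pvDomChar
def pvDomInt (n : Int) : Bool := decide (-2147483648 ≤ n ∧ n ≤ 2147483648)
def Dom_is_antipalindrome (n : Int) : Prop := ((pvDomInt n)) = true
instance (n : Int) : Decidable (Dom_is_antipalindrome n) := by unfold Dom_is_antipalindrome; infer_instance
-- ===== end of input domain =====

-- B replaces A's count/reverse-half/compare integer loops with a digit-list extraction and a
-- two-pointer scan (objective: simpler); on inputs described by D_ below A's answer is wrong and B's is intended.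

-- ===== PORT A =====
-- while aux != 0: parametru1 += 1; aux //= 10   (fuel only makes the loop total; within Pre_ and Dom it never runs out)
def pvCnt : Nat → Int → Int → Int
  | 0, p1, _ => p1
  | f+1, p1, aux => if aux ≠ 0 then pvCnt f (p1+1) (PySem.Int.floordiv aux 10) else p1

-- while parametru2 < half: invers = invers*10 + copie%10; copie //= 10; parametru2 += 1
def pvRev : Nat → Int → Int → Int → Int → Int × Int
  | 0, inv, cop, _, _ => (inv, cop)
  | f+1, inv, cop, p2, half =>
    if p2 < half then
      pvRev f (inv * 10 + PySem.Int.mod cop 10) (PySem.Int.floordiv cop 10) (p2+1) half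
    else (inv, cop)

-- while invers != 0: if invers%10 == copie%10: return False; invers //= 10; copie //= 10
def pvCmp : Nat → Int → Int → Bool
  | 0, _, _ => true
  | f+1, inv, cop =>
    if inv ≠ 0 then
      if PySem.Int.mod inv 10 == PySem.Int.mod cop 10 then false
      else pvCmp f (PySem.Int.floordiv inv 10) (PySem.Int.floordiv cop 10)
    else true

def is_antipalindrome (n : Int) : Bool :=
  let p1 := pvCnt 128 0 n
  if PySem.Int.mod p1 2 == 0 then
    let (inv, cop) := pvRev 128 0 n 0 (PySem.Int.floordiv p1 2)
    pvCmp 128 inv cop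
  else
    let (inv, cop) := pvRev 128 0 n 0 (PySem.Int.floordiv p1 2)
    pvCmp 128 inv (PySem.Int.floordiv cop 10)

-- ===== PORT B =====
-- digits = []; while n: digits.append(n % 10); n //= 10
def pvDigs : Nat → Int → List Int → List Int
  | 0, _, acc => acc
  | f+1, n, acc =>
    if n ≠ 0 then pvDigs f (PySem.Int.floordiv n 10) (acc ++ [PySem.Int.mod n 10]) else acc

-- while left < right: if digits[left] == digits[right]: return False; left += 1; right -= 1
def pvTwoPtr : Nat → List Int → Int → Int → Bool
  | 0, _, _, _ => true
  | f+1, ds, l, r =>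
    if l < r then
      if PySem.List.pyGetD ds l 0 == PySem.List.pyGetD ds r 0 then false
      else pvTwoPtr f ds (l+1) (r-1)
    else true

def is_antipalindrome_alt (n : Int) : Bool :=
  let ds := pvDigs 128 n []
  pvTwoPtr 128 ds 0 ((ds.length : Int) - 1)

-- ===== PRECONDITION & SPEC =====
-- Pre_ excludes negative n, on which the Python A (and B) loops forever (floor division toward -infinity never reaches zero).
def Pre_is_antipalindrome (n : Int) : Prop := 0 ≤ n
instance (n : Int) : Decidable (Pre_is_antipalindrome n) := by unfold Pre_is_antipalindrome; infer_instance
def pvWitness_is_antipalindrome : Int := 7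

-- digit j of n equals the digit mirrored across the middle of n's L-digit decimal expansion
def pvPair (n : Int) (L j : Nat) : Prop := n / 10^j % 10 = n / 10^(L-1-j) % 10

-- On nonnegative n whose low digits are zero in a way that makes A's reversed lower half drop
-- leading zeros while every pair A does compare differs (e.g. n = 1000), A skips mirror pairs
-- whose digits are both 0 and wrongly returns True; B compares every mirror pair and returns
-- False, the intended answer.  (Equivalently: some mirror digit pair of n is equal, and every
-- equal mirror pair sits inside n's trailing zeros.)
def D_is_antipalindrome (n : Int) : Prop :=
  let L := (Nat.digits 10 n.toNat).length
  (∃ i < L/2, pvPair n L i) ∧ ∀ j < L/2, pvPair n L j → n % 10^(j+1) = 0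
instance (n : Int) : Decidable (D_is_antipalindrome n) := by unfold D_is_antipalindrome pvPair; infer_instance

def Spec_is_antipalindrome (n : Int) (out : Bool) : Prop :=
  ¬ D_is_antipalindrome n → out = is_antipalindrome_alt n
instance (n : Int) (out : Bool) : Decidable (Spec_is_antipalindrome n out) := by
  unfold Spec_is_antipalindrome; infer_instance

def pvDiffWitness_is_antipalindrome : Int := 1000
def pvDiffWitnessOut_is_antipalindrome : Bool × Bool := (true, false)

-- ===== CLAIM (what is proved, stated in full; the proofs are below) =====
def Claim_unchanged_is_antipalindrome : Prop :=
  ∀ (n : Int), Dom_is_antipalindrome n → Pre_is_antipalindrome n →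
    Spec_is_antipalindrome n (is_antipalindrome n)
def Claim_changed_is_antipalindrome : Prop :=
  Dom_is_antipalindrome (pvDiffWitness_is_antipalindrome) ∧
  Pre_is_antipalindrome (pvDiffWitness_is_antipalindrome) ∧
  D_is_antipalindrome (pvDiffWitness_is_antipalindrome) ∧
  is_antipalindrome (pvDiffWitness_is_antipalindrome) = pvDiffWitnessOut_is_antipalindrome.1 ∧
  is_antipalindrome_alt (pvDiffWitness_is_antipalindrome) = pvDiffWitnessOut_is_antipalindrome.2 ∧
  pvDiffWitnessOut_is_antipalindrome.1 ≠ pvDiffWitnessOut_is_antipalindrome.2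
def Claim_exact_is_antipalindrome : Prop :=
  ∀ (n : Int), Dom_is_antipalindrome n → Pre_is_antipalindrome n → D_is_antipalindrome n →
    is_antipalindrome n ≠ is_antipalindrome_alt n

-- ===== LEMMAS AND PROOFS =====

-- length of the zero prefix of a list (proof-side helper)
def pvZPre : List Nat → Nat
  | [] => 0
  | d :: t => if d = 0 then pvZPre t + 1 else 0


-- reversed-lower-half spec value
def pvRv : Nat → Nat → Nat → Nat
  | inv, _, 0 => inv
  | inv, c, k+1 => pvRv (inv * 10 + c % 10) (c / 10) k

theorem digits_getD (k : Nat) : ∀ (n : Nat), (Nat.digits 10 n).getD k 0 = n / 10^k % 10 := by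
  induction k with
  | zero =>
    intro n
    by_cases hn : n = 0
    · simp [hn]
    · rw [Nat.digits_def' (by norm_num : 1 < 10) (Nat.pos_of_ne_zero hn)]
      simp
  | succ k ih =>
    intro n
    by_cases hn : n = 0
    · simp [hn]
    · rw [Nat.digits_def' (by norm_num : 1 < 10) (Nat.pos_of_ne_zero hn)]
      simp only [List.getD_cons_succ, ih (n/10)]
      rw [Nat.div_div_eq_div_mul, pow_succ]
      ring_nf

theorem len_le_128 (n : Nat) (h : n ≤ 2147483648) : (Nat.digits 10 n).length ≤ 128 := by
  have h1 : n < 10^10 := by omega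
  have : n < 10^128 := lt_of_lt_of_le h1 (Nat.pow_le_pow_right (by norm_num) (by norm_num))
  exact (Nat.digits_length_le_iff (by norm_num) n).mpr this

theorem pvZPre_zero (l : List Nat) (j : Nat) (h : j < pvZPre l) : l.getD j 0 = 0 := by
  induction l generalizing j with
  | nil => simp [pvZPre] at h
  | cons d t ih =>
    by_cases hd : d = 0
    · cases j with
      | zero => simp [hd]
      | succ j =>
        simp only [pvZPre, hd, if_true] at h
        simpa using ih j (by omega)
    · simp [pvZPre, hd] at h

theorem pvZPre_ne (l : List Nat) (h : pvZPre l < l.length) : l.getD (pvZPre l) 0 ≠ 0 := by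
  induction l with
  | nil => simp at h
  | cons d t ih =>
    by_cases hd : d = 0
    · simp only [pvZPre, hd, if_true] at h ⊢
      simp
      exact ih (by simpa using h)
    · simpa [pvZPre, hd] using hd

theorem pvZPre_take (l : List Nat) (k : Nat) (h : k ≤ pvZPre l) :
    l.take k = List.replicate k 0 := by
  induction l generalizing k with
  | nil => simp [pvZPre] at h; simp [h]
  | cons d t ih =>
    by_cases hd : d = 0
    · cases k with
      | zero => simp
      | succ k =>
        simp only [pvZPre, hd, if_true] at h
        simp [hd, List.replicate_succ, ih k (by omega)]
    · simp [pvZPre, hd] at h; simp [h]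

theorem fd10 (n : Nat) : PySem.Int.floordiv ((n : Nat) : Int) 10 = ((n / 10 : Nat) : Int) := by
  rw [PySem.Int.floordiv_eq_ediv_of_pos (by norm_num)]
  push_cast [Int.natCast_div]; ring

theorem md10 (n : Nat) : PySem.Int.mod ((n : Nat) : Int) 10 = ((n % 10 : Nat) : Int) := by
  rw [PySem.Int.mod_eq_emod_of_pos (by norm_num)]
  push_cast [Int.natCast_mod]; ring

theorem fd2 (n : Nat) : PySem.Int.floordiv ((n : Nat) : Int) 2 = ((n / 2 : Nat) : Int) := by
  rw [PySem.Int.floordiv_eq_ediv_of_pos (by norm_num)]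
  push_cast [Int.natCast_div]; ring

theorem md2 (n : Nat) : PySem.Int.mod ((n : Nat) : Int) 2 = ((n % 2 : Nat) : Int) := by
  rw [PySem.Int.mod_eq_emod_of_pos (by norm_num)]
  push_cast [Int.natCast_mod]; ring

theorem ddp (a k : Nat) : a / 10 / 10^k = a / 10^(k+1) := by
  rw [Nat.div_div_eq_div_mul, pow_succ, mul_comm]

theorem pvCnt_spec (f : Nat) : ∀ (p1 : Int) (n : Nat), (Nat.digits 10 n).length ≤ f →
    pvCnt f p1 (n : Int) = p1 + (Nat.digits 10 n).length := by
  induction f with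
  | zero =>
    intro p1 n h
    have : Nat.digits 10 n = [] := List.eq_nil_of_length_eq_zero (Nat.le_zero.mp h)
    simp [pvCnt, this]
  | succ f ih =>
    intro p1 n h
    by_cases hn : n = 0
    · simp [pvCnt, hn]
    · have hcast : ((n : Nat) : Int) ≠ 0 := by exact_mod_cast hn
      rw [Nat.digits_def' (by norm_num : 1 < 10) (Nat.pos_of_ne_zero hn)] at h ⊢
      simp only [List.length_cons] at h ⊢
      simp only [pvCnt, hcast, ne_eq, not_false_eq_true, if_pos, fd10]
      rw [ih (p1+1) (n/10) (by omega)]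
      push_cast
      ring

theorem pvRev_spec (f : Nat) : ∀ (inv c : Nat) (p2 half : Int) (k : Nat),
    half - p2 = k → k ≤ f →
    pvRev f (inv : Int) (c : Int) p2 half = ((pvRv inv c k : Int), ((c / 10^k : Nat) : Int)) := by
  induction f with
  | zero =>
    intro inv c p2 half k hk hf
    interval_cases k
    have : ¬ (p2 < half) := by omega
    simp [pvRev, pvRv, this]
  | succ f ih =>
    intro inv c p2 half k hk hf
    cases k with
    | zero =>
      have : ¬ (p2 < half) := by omega
      simp [pvRev, pvRv, this]
    | succ k =>
      have hlt : p2 < half := by omega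
      simp only [pvRev, hlt, if_pos, md10, fd10]
      have : (inv : Int) * 10 + ((c % 10 : Nat) : Int) = ((inv * 10 + c % 10 : Nat) : Int) := by
        push_cast; ring
      rw [this, ih (inv * 10 + c % 10) (c / 10) (p2+1) half k (by omega) (by omega)]
      simp only [pvRv]
      congr 2
      rw [Nat.div_div_eq_div_mul, pow_succ]
      ring_nf

theorem pvRv_eq (k : Nat) : ∀ (c inv : Nat), k ≤ (Nat.digits 10 c).length →
    pvRv inv c k = inv * 10^k + Nat.ofDigits 10 (((Nat.digits 10 c).take k).reverse) := by
  induction k with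
  | zero => intro c inv h; simp [pvRv]
  | succ k ih =>
    intro c inv h
    have hc : c ≠ 0 := by
      intro h0; rw [h0] at h; simp at h
    rw [Nat.digits_def' (by norm_num : 1 < 10) (Nat.pos_of_ne_zero hc)] at h ⊢
    simp only [List.length_cons] at h
    simp only [pvRv]
    rw [ih (c / 10) _ (by omega)]
    simp only [List.take_succ_cons, List.reverse_cons]
    rw [Nat.ofDigits_append]
    have hlen : (((Nat.digits 10 (c / 10)).take k).reverse).length = k := by
      simp [min_eq_left (by omega : k ≤ (Nat.digits 10 (c / 10)).length)]
    rw [hlen]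
    simp [Nat.ofDigits_singleton]
    ring

theorem pvCmp_spec (f : Nat) : ∀ (inv c : Nat), (Nat.digits 10 inv).length ≤ f →
    (pvCmp f (inv : Int) (c : Int) = true ↔
      ∀ k < (Nat.digits 10 inv).length, inv / 10^k % 10 ≠ c / 10^k % 10) := by
  induction f with
  | zero =>
    intro inv c h
    have : Nat.digits 10 inv = [] := List.eq_nil_of_length_eq_zero (Nat.le_zero.mp h)
    simp [pvCmp, this]
  | succ f ih =>
    intro inv c h
    by_cases hn : inv = 0
    · simp [pvCmp, hn]
    · have hcast : ((inv : Nat) : Int) ≠ 0 := by exact_mod_cast hn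
      rw [Nat.digits_def' (by norm_num : 1 < 10) (Nat.pos_of_ne_zero hn)] at h ⊢
      simp only [List.length_cons] at h ⊢
      by_cases he : inv % 10 = c % 10
      · have hbt : (PySem.Int.mod (inv : Int) 10 == PySem.Int.mod (c : Int) 10) = true := by
          rw [md10, md10]; simp only [beq_iff_eq]; exact_mod_cast he
        simp only [pvCmp, hcast, ne_eq, not_false_eq_true, if_pos, hbt, if_true]
        constructor
        · intro hc; exact absurd hc (by simp)
        · intro hall
          exact absurd he (by simpa using hall 0 (by omega))
      · have hbeq : (PySem.Int.mod (inv : Int) 10 == PySem.Int.mod (c : Int) 10) = false := by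
          rw [md10, md10]
          simp only [beq_eq_false_iff_ne, ne_eq]
          exact_mod_cast he
        simp only [pvCmp, hcast, ne_eq, not_false_eq_true, if_pos, hbeq, Bool.false_eq_true,
          if_false, fd10]
        rw [ih (inv / 10) (c / 10) (by omega)]
        constructor
        · intro hall k hk
          cases k with
          | zero => simpa using he
          | succ k =>
            have := hall k (by omega)
            rw [ddp, ddp] at this
            exact this
        · intro hall k hk
          have := hall (k+1) (by omega)
          rw [← ddp, ← ddp] at this
          exact this

theorem pvDigs_spec (f : Nat) : ∀ (n : Nat) (acc : List Int), (Nat.digits 10 n).length ≤ f →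
    pvDigs f (n : Int) acc = acc ++ (Nat.digits 10 n).map (fun (x : Nat) => (x : Int)) := by
  induction f with
  | zero =>
    intro n acc h
    have : Nat.digits 10 n = [] := List.eq_nil_of_length_eq_zero (Nat.le_zero.mp h)
    simp [pvDigs, this]
  | succ f ih =>
    intro n acc h
    by_cases hn : n = 0
    · simp [pvDigs, hn]
    · have hcast : ((n : Nat) : Int) ≠ 0 := by exact_mod_cast hn
      rw [Nat.digits_def' (by norm_num : 1 < 10) (Nat.pos_of_ne_zero hn)] at h ⊢
      simp only [List.length_cons] at h
      simp only [pvDigs, hcast, ne_eq, not_false_eq_true, if_pos, fd10, md10]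
      rw [ih (n/10) _ (by omega)]
      simp

theorem pvTwoPtr_spec (f : Nat) : ∀ (L : List Nat) (l r : Nat), r < L.length → r ≤ f →
    (pvTwoPtr f (L.map (fun (x : Nat) => (x : Int))) (l : Int) (r : Int) = true ↔
      ∀ k, l + 2*k < r → L.getD (l+k) 0 ≠ L.getD (r-k) 0) := by
  induction f with
  | zero =>
    intro L l r hr hf
    have hr0 : r = 0 := by omega
    subst hr0
    exact ⟨fun _ k hk => absurd hk (by omega), fun _ => rfl⟩
  | succ f ih =>
    intro L l r hr hf
    by_cases hlr : l < r
    · have hlr' : (l : Int) < (r : Int) := by exact_mod_cast hlr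
      have hgl : PySem.List.pyGetD (L.map (fun (x : Nat) => (x : Int))) (l : Int) 0
          = ((L.getD l 0 : Nat) : Int) := by
        rw [PySem.List.pyGetD_natCast]
        rcases Nat.lt_or_ge l L.length with h | h
        · rw [List.getD_eq_getElem _ _ (by simpa using h), List.getD_eq_getElem _ _ h,
            List.getElem_map]
        · rw [List.getD_eq_default _ _ (by simpa using h), List.getD_eq_default _ _ h]
          simp
      have hgr : PySem.List.pyGetD (L.map (fun (x : Nat) => (x : Int))) (r : Int) 0
          = ((L.getD r 0 : Nat) : Int) := by
        rw [PySem.List.pyGetD_natCast]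
        rw [List.getD_eq_getElem _ _ (by simpa using hr), List.getD_eq_getElem _ _ hr,
          List.getElem_map]
      simp only [pvTwoPtr, hlr', if_pos, hgl, hgr]
      by_cases he : L.getD l 0 = L.getD r 0
      · have hbt : (((L.getD l 0 : Nat) : Int) == ((L.getD r 0 : Nat) : Int)) = true := by
          simp only [beq_iff_eq]; exact_mod_cast he
        simp only [hbt, if_true]
        constructor
        · intro hc; exact absurd hc (by simp)
        · intro hall
          exact absurd he (by simpa using hall 0 (by omega))
      · have hbeq : (((L.getD l 0 : Nat) : Int) == ((L.getD r 0 : Nat) : Int)) = false := by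
          simp only [beq_eq_false_iff_ne, ne_eq]
          exact_mod_cast he
        simp only [hbeq, Bool.false_eq_true, if_false]
        have hc1 : ((l : Int) + 1) = ((l + 1 : Nat) : Int) := by push_cast; ring
        have hc2 : ((r : Int) - 1) = ((r - 1 : Nat) : Int) := by
          have : 1 ≤ r := by omega
          push_cast [this]; ring
        rw [hc1, hc2, ih L (l+1) (r-1) (by omega) (by omega)]
        constructor
        · intro hall k hk
          cases k with
          | zero => simpa using he
          | succ k =>
            have := hall k (by omega)
            have e1 : l + 1 + k = l + (k+1) := by omega
            have e2 : r - 1 - k = r - (k+1) := by omega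
            rw [e1, e2] at this
            exact this
        · intro hall k hk
          have := hall (k+1) (by omega)
          have e1 : l + 1 + k = l + (k+1) := by omega
          have e2 : r - 1 - k = r - (k+1) := by omega
          rw [e1, e2]
          exact this
    · have hlr' : ¬ ((l : Int) < (r : Int)) := by exact_mod_cast hlr
      simp only [pvTwoPtr, hlr', if_false, true_iff]
      intro k hk
      omega

theorem ofd_rep (z : Nat) : Nat.ofDigits 10 (List.replicate z (0:Nat)) = 0 := by
  induction z with
  | zero => simp
  | succ z ih => simp [List.replicate_succ, Nat.ofDigits_cons, ih]

theorem inv_val (ds : List Nat) (h z : Nat) (hz : z ≤ pvZPre ds) (hzh : z ≤ h) :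
    Nat.ofDigits 10 ((ds.take h).reverse) =
      Nat.ofDigits 10 (((ds.take h).drop z).reverse) := by
  have hsplit : ds.take h = List.replicate z 0 ++ (ds.take h).drop z := by
    have h1 : (ds.take h).take z = ds.take z := by
      rw [List.take_take, min_eq_left hzh]
    have h2 : ds.take z = List.replicate z 0 := pvZPre_take ds z hz
    conv_lhs => rw [← List.take_append_drop z (ds.take h)]
    rw [h1, h2]
  calc Nat.ofDigits 10 ((ds.take h).reverse)
      = Nat.ofDigits 10 ((List.replicate z 0 ++ (ds.take h).drop z).reverse) := by rw [← hsplit]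
    _ = Nat.ofDigits 10 (((ds.take h).drop z).reverse) := by
        rw [List.reverse_append, List.reverse_replicate, Nat.ofDigits_append, ofd_rep,
          mul_zero, add_zero]

theorem digits_inv (ds : List Nat) (m h z : Nat)
    (hds : ds = Nat.digits 10 m) (hh : h ≤ ds.length) (hz : z = min (pvZPre ds) h) :
    Nat.digits 10 (Nat.ofDigits 10 (((ds.take h).drop z).reverse)) =
      ((ds.take h).drop z).reverse := by
  apply Nat.digits_ofDigits 10 (by norm_num)
  · intro x hx
    refine Nat.digits_lt_base (by norm_num) (m := m) ?_
    rw [← hds]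
    exact List.mem_of_mem_take (List.mem_of_mem_drop (List.mem_reverse.mp hx))
  · intro hne
    have hlen : ((ds.take h).drop z).length = h - z := by
      simp [List.length_drop, List.length_take, min_eq_left hh]
    have hzh : z < h := by
      by_contra hc
      apply hne
      apply List.reverse_eq_nil_iff.mpr
      apply List.eq_nil_of_length_eq_zero
      omega
    have hpz : pvZPre ds = z := by omega
    have hzlen : z < ds.length := by omega
    have hne0 : ds[z] ≠ 0 := by
      have := pvZPre_ne ds (by omega)
      rwa [hpz, List.getD_eq_getElem _ _ hzlen] at this
    have hhead : ((ds.take h).drop z)[0]'(by omega) = ds[z] := by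
      rw [List.getElem_drop, List.getElem_take]
      simp
    rw [List.getLast_reverse]
    simpa [List.head_eq_getElem] using hhead ▸ hne0

theorem rprime_getD (ds : List Nat) (h z k : Nat) (hh : h ≤ ds.length) (hz : z ≤ h)
    (hk : k < h - z) :
    (((ds.take h).drop z).reverse).getD k 0 = ds.getD (h - 1 - k) 0 := by
  have hlen : ((ds.take h).drop z).length = h - z := by
    simp [List.length_drop, List.length_take, min_eq_left hh]
  have hk1 : k < (((ds.take h).drop z).reverse).length := by simp [hlen]; omega
  have hk2 : h - 1 - k < ds.length := by omega
  rw [List.getD_eq_getElem _ _ hk1, List.getD_eq_getElem _ _ hk2]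
  rw [List.getElem_reverse]
  rw [List.getElem_drop, List.getElem_take]
  congr 1
  rw [hlen]
  omega

theorem cmp_char (m H : Nat) (hm : m ≤ 2147483648)
    (hH : H = (Nat.digits 10 m).length / 2 + (Nat.digits 10 m).length % 2) :
    (pvCmp 128 ((pvRv 0 m ((Nat.digits 10 m).length / 2) : Nat) : Int)
        ((m / 10^H : Nat) : Int) = true ↔
      ∀ j, min (pvZPre (Nat.digits 10 m)) ((Nat.digits 10 m).length / 2) ≤ j →
        j < (Nat.digits 10 m).length / 2 →
        (Nat.digits 10 m).getD j 0 ≠ (Nat.digits 10 m).getD ((Nat.digits 10 m).length - 1 - j) 0) := by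
  set ds := Nat.digits 10 m with hdsdef
  set L := ds.length with hLdef
  set h := L / 2 with hhdef
  set z := min (pvZPre ds) h with hzdef
  have hL : L ≤ 128 := len_le_128 m hm
  have hhL : h ≤ L := by omega
  have hinv : pvRv 0 m h = Nat.ofDigits 10 (((ds.take h).drop z).reverse) := by
    rw [pvRv_eq h m 0 (by omega)]
    rw [zero_mul, zero_add]
    exact inv_val ds h z (min_le_left _ _) (min_le_right _ _)
  have hdig : Nat.digits 10 (pvRv 0 m h) = ((ds.take h).drop z).reverse := by
    rw [hinv]
    exact digits_inv ds m h z hdsdef hhL hzdef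
  have hlen2 : (Nat.digits 10 (pvRv 0 m h)).length = h - z := by
    rw [hdig]
    simp only [List.length_reverse, List.length_drop, List.length_take]
    omega
  have keyA : ∀ k, k < h - z → pvRv 0 m h / 10^k % 10 = ds.getD (h - 1 - k) 0 := by
    intro k hk
    rw [← digits_getD k (pvRv 0 m h), hdig]
    exact rprime_getD ds h z k hhL (min_le_right _ _) hk
  have keyC : ∀ k, m / 10^H / 10^k % 10 = ds.getD (H + k) 0 := by
    intro k
    rw [Nat.div_div_eq_div_mul, ← pow_add, ← digits_getD (H+k) m]
  rw [pvCmp_spec 128 (pvRv 0 m h) (m / 10^H) (by omega)]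
  rw [hlen2]
  constructor
  · intro ha j hzj hjh
    have hb : h - 1 - j < h - z := by omega
    have := ha (h - 1 - j) hb
    rw [keyA _ hb, keyC] at this
    rw [show h - 1 - (h - 1 - j) = j by omega, show H + (h - 1 - j) = L - 1 - j by omega] at this
    exact this
  · intro ha k hk
    have h1 : z ≤ h - 1 - k := by omega
    have h2 : h - 1 - k < h := by omega
    have := ha (h - 1 - k) h1 h2
    rw [keyA _ hk, keyC]
    rw [show L - 1 - (h - 1 - k) = H + k by omega] at this
    exact this

theorem portA_char (m : Nat) (hm : m ≤ 2147483648) :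
    (is_antipalindrome (m : Int) = true ↔
      ∀ j, min (pvZPre (Nat.digits 10 m)) ((Nat.digits 10 m).length / 2) ≤ j →
        j < (Nat.digits 10 m).length / 2 →
        (Nat.digits 10 m).getD j 0 ≠ (Nat.digits 10 m).getD ((Nat.digits 10 m).length - 1 - j) 0) := by
  have hL : (Nat.digits 10 m).length ≤ 128 := len_le_128 m hm
  have hcnt : pvCnt 128 0 (m : Int) = (((Nat.digits 10 m).length : Nat) : Int) := by
    rw [pvCnt_spec 128 0 m hL]; simp
  have hrev : pvRev 128 0 (m : Int) 0 (((Nat.digits 10 m).length / 2 : Nat) : Int)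
      = ((pvRv 0 m ((Nat.digits 10 m).length / 2) : Int),
         ((m / 10^((Nat.digits 10 m).length / 2) : Nat) : Int)) := by
    have := pvRev_spec 128 0 m 0 (((Nat.digits 10 m).length / 2 : Nat) : Int)
      ((Nat.digits 10 m).length / 2) (by simp) (by omega)
    simpa using this
  show (let p1 := pvCnt 128 0 (m : Int);
    if PySem.Int.mod p1 2 == 0 then
      let x := pvRev 128 0 (m : Int) 0 (PySem.Int.floordiv p1 2)
      pvCmp 128 x.1 x.2
    else
      let x := pvRev 128 0 (m : Int) 0 (PySem.Int.floordiv p1 2)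
      pvCmp 128 x.1 (PySem.Int.floordiv x.2 10)) = true ↔ _
  simp only [hcnt, md2, fd2, hrev]
  rcases Nat.mod_two_eq_zero_or_one (Nat.digits 10 m).length with hpar | hpar
  · rw [hpar]
    simp only [Nat.cast_zero, BEq.rfl, if_true]
    exact cmp_char m ((Nat.digits 10 m).length / 2) hm (by omega)
  · rw [hpar]
    have hb1 : (((1:Nat) : Int) == (0 : Int)) = false := by decide
    simp only [hb1, Bool.false_eq_true, if_false, fd10]
    rw [show m / 10^((Nat.digits 10 m).length / 2) / 10
        = m / 10^((Nat.digits 10 m).length / 2 + 1) by rw [Nat.div_div_eq_div_mul, pow_succ]]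
    exact cmp_char m ((Nat.digits 10 m).length / 2 + 1) hm (by omega)

theorem altB_char (m : Nat) (hm : m ≤ 2147483648) :
    (is_antipalindrome_alt (m : Int) = true ↔
      ∀ j < (Nat.digits 10 m).length / 2,
        (Nat.digits 10 m).getD j 0 ≠ (Nat.digits 10 m).getD ((Nat.digits 10 m).length - 1 - j) 0) := by
  have hL : (Nat.digits 10 m).length ≤ 128 := len_le_128 m hm
  have hds : pvDigs 128 (m : Int) [] = (Nat.digits 10 m).map (fun (x : Nat) => (x : Int)) := by
    simpa using pvDigs_spec 128 m [] hL
  by_cases hm0 : m = 0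
  · subst hm0
    constructor
    · intro _ j hj
      simp at hj
    · intro _
      rfl
  · have hL1 : 1 ≤ (Nat.digits 10 m).length := by
      exact List.length_pos_of_ne_nil (Nat.digits_ne_nil_iff_ne_zero.mpr hm0)
    set ds := Nat.digits 10 m with hdsdef
    have hlen : ((ds.map (fun (x : Nat) => (x : Int))).length : Int) - 1
        = ((ds.length - 1 : Nat) : Int) := by
      simp only [List.length_map]
      push_cast [hL1]
      ring
    show pvTwoPtr 128 (pvDigs 128 (m : Int) []) 0 (((pvDigs 128 (m : Int) []).length : Int) - 1) = true ↔ _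
    rw [hds, hlen]
    rw [show (0 : Int) = ((0 : Nat) : Int) from rfl,
      pvTwoPtr_spec 128 ds 0 (ds.length - 1) (by omega) (by omega)]
    constructor
    · intro hall j hj
      have := hall j (by omega)
      simpa using this
    · intro hall k hk
      have := hall k (by omega)
      simpa using this

theorem zero_pref (m : Nat) : ∀ (k : Nat),
    (m % 10^k = 0 ↔ ∀ t, t < k → (Nat.digits 10 m).getD t 0 = 0) := by
  intro k
  induction k with
  | zero => simp [Nat.mod_one]
  | succ k ih =>
    rw [pow_succ, Nat.mod_mul]
    have hp : (10:Nat)^k ≠ 0 := by positivity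
    constructor
    · intro hc t ht
      have h1 : m % 10^k = 0 ∧ m / 10^k % 10 = 0 := by
        have := Nat.add_eq_zero.mp hc
        exact ⟨this.1, by
          have := this.2
          rcases Nat.mul_eq_zero.mp this with h | h
          · exact absurd h hp
          · exact h⟩
      rcases Nat.lt_or_ge t k with h | h
      · exact (ih.mp h1.1) t h
      · have ht' : t = k := by omega
        rw [ht', digits_getD]
        exact h1.2
    · intro hall
      have h1 : m % 10^k = 0 := ih.mpr (fun t ht => hall t (by omega))
      have h2 : m / 10^k % 10 = 0 := by rw [← digits_getD]; exact hall k (by omega)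
      rw [h1, h2]
      simp

theorem main_values (n : Int) (hd : Dom_is_antipalindrome n) (hp : Pre_is_antipalindrome n) :
    (D_is_antipalindrome n → is_antipalindrome n = true ∧ is_antipalindrome_alt n = false) ∧
    (¬ D_is_antipalindrome n → is_antipalindrome n = is_antipalindrome_alt n) := by
  have hp' : (0:Int) ≤ n := hp
  have hmle : n.toNat ≤ 2147483648 := by
    unfold Dom_is_antipalindrome pvDomInt at hd
    simp at hd
    omega
  set m := n.toNat with hmdef
  have hn : n = (m : Int) := (Int.toNat_of_nonneg hp').symm
  have hL : (Nat.digits 10 m).length ≤ 128 := len_le_128 m hmle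
  have hA := portA_char m hmle
  have hB := altB_char m hmle
  set ds := Nat.digits 10 m with hdsdef
  set L := ds.length with hLdef
  set h := L / 2 with hhdef
  set z := min (pvZPre ds) h with hzdef
  have hzh : z ≤ h := min_le_right _ _
  have hzpz : z ≤ pvZPre ds := min_le_left _ _
  have hhL : h ≤ L := by omega
  -- cast bridges between the Int arithmetic of D_ and Nat digit arithmetic
  have cmod : ∀ k : Nat, (n % (10:Int)^k = 0 ↔ m % 10^k = 0) := by
    intro k
    rw [hn]
    constructor
    · intro hc
      have : ((m % 10^k : Nat) : Int) = 0 := by push_cast [Int.natCast_mod]; exact hc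
      exact_mod_cast this
    · intro hc
      have : ((m % 10^k : Nat) : Int) = 0 := by exact_mod_cast hc
      rw [← this]; push_cast [Int.natCast_mod]; ring
  have cdig : ∀ a : Nat, n / (10:Int)^a % 10 = ((m / 10^a % 10 : Nat) : Int) := by
    intro a
    rw [hn]
    push_cast [Int.natCast_div, Int.natCast_mod]
    ring
  have hzp1 : ∀ i : Nat, i < h → ((∀ t, t < i+1 → ds.getD t 0 = 0) ↔ i < z) := by
    intro i hih
    constructor
    · intro hall
      rcases Nat.lt_or_ge i (pvZPre ds) with hc | hc
      · omega
      · exfalso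
        have hlt : pvZPre ds < L := by omega
        exact pvZPre_ne ds hlt (hall (pvZPre ds) (by omega))
    · intro hiz t ht
      exact pvZPre_zero ds t (by omega)
  have hzp2 : ∀ j : Nat, j < h → (m % 10^(j+1) ≠ 0 ↔ z ≤ j) := by
    intro j hjh
    rw [Ne, zero_pref m (j+1)]
    rw [show (∀ t, t < j+1 → ds.getD t 0 = 0) ↔ j < z from hzp1 j hjh]
    omega
  have hPair : ∀ j : Nat, (pvPair n L j ↔ ds.getD j 0 = ds.getD (L-1-j) 0) := by
    intro j
    unfold pvPair
    rw [cdig j, cdig (L-1-j), digits_getD, digits_getD]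
    exact ⟨fun hc => by exact_mod_cast hc, fun hc => by exact_mod_cast hc⟩
  have hZj : ∀ j, j < h → (n % 10^(j+1) = 0 ↔ j < z) := by
    intro j hjh
    rw [cmod (j+1), zero_pref m (j+1)]
    exact hzp1 j hjh
  have hLD : (Nat.digits 10 n.toNat).length = L := by rw [← hmdef, ← hdsdef]
  have hDiff : D_is_antipalindrome n ↔
      ((∃ i < z, ds.getD (L - 1 - i) 0 = 0) ∧
        ∀ j, z ≤ j → j < h → ds.getD j 0 ≠ ds.getD (L - 1 - j) 0) := by
    unfold D_is_antipalindrome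
    rw [hLD]
    constructor
    · rintro ⟨⟨i, hih, hEi⟩, hall⟩
      have hiz : i < z := (hZj i hih).mp (hall i hih hEi)
      have hdi : ds.getD i 0 = 0 := pvZPre_zero ds i (by omega)
      refine ⟨⟨i, hiz, ?_⟩, ?_⟩
      · rw [← (hPair i).mp hEi]
        exact hdi
      · intro j hzj hjh heq
        have hEj : pvPair n L j := (hPair j).mpr heq
        have := (hZj j hjh).mp (hall j hjh hEj)
        omega
    · rintro ⟨⟨i, hiz, hdig⟩, hall⟩
      refine ⟨⟨i, by omega, (hPair i).mpr (by rw [pvZPre_zero ds i (by omega), hdig])⟩, ?_⟩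
      intro j hjh hEj
      rcases Nat.lt_or_ge j z with hjz | hjz
      · exact (hZj j hjh).mpr hjz
      · exact absurd ((hPair j).mp hEj) (hall j hjz hjh)
  constructor
  · intro hD
    obtain ⟨⟨i, hiz, hi0⟩, htail⟩ := hDiff.mp hD
    refine ⟨by rw [hn]; exact hA.mpr htail, ?_⟩
    rw [hn]
    cases hBeq : is_antipalindrome_alt (m : Int) with
    | false => rfl
    | true =>
      exfalso
      have hall := hB.mp hBeq
      have hPi := hall i (by omega)
      have h0 : ds.getD i 0 = 0 := pvZPre_zero ds i (by omega)
      exact hPi (by rw [h0, hi0])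
  · intro hnD
    rw [hn]
    by_cases hAv : is_antipalindrome (m : Int) = true
    · have htail := hA.mp hAv
      have hBt : is_antipalindrome_alt (m : Int) = true := by
        rw [hB]
        intro j hj
        by_cases hjz : j < z
        · have h0 : ds.getD j 0 = 0 := pvZPre_zero ds j (by omega)
          have h1 : ds.getD (L - 1 - j) 0 ≠ 0 := by
            intro hc
            exact hnD (hDiff.mpr ⟨⟨j, hjz, hc⟩, htail⟩)
          rw [h0]
          exact fun hcc => h1 hcc.symm
        · exact htail j (by omega) hj
      rw [hAv, hBt]
    · have hAf : is_antipalindrome (m : Int) = false := by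
        cases hc : is_antipalindrome (m : Int) with
        | false => rfl
        | true => exact absurd hc hAv
      have hBf : is_antipalindrome_alt (m : Int) = false := by
        cases hc : is_antipalindrome_alt (m : Int) with
        | false => rfl
        | true =>
          exfalso
          apply hAv
          apply hA.mpr
          intro j hzj hjh
          exact hB.mp hc j hjh
      rw [hAf, hBf]

-- ===== VERDICT (by name: the statement is the Claim_ definition above) =====
theorem is_antipalindrome_spec : Claim_unchanged_is_antipalindrome := by
  intro n hd hp hnd
  exact (main_values n hd hp).2 hnd

theorem is_antipalindrome_changed : Claim_changed_is_antipalindrome := by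
  unfold Claim_changed_is_antipalindrome
  refine ⟨by decide, by decide, ?_, by decide, by decide, by decide⟩
  unfold D_is_antipalindrome pvDiffWitness_is_antipalindrome pvPair
  have h0 : (1000:Int).toNat = 1000 := rfl
  have hds : (Nat.digits 10 1000).length = 4 := by norm_num
  simp only [h0, hds]
  decide

theorem is_antipalindrome_tight : Claim_exact_is_antipalindrome := by
  intro n hd hp hD
  obtain ⟨ha, hb⟩ := (main_values n hd hp).1 hD
  simp [ha, hb]
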